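-- pv_equiv track=rewrite | github.com/shinh/test | onnx_gen_4949_prime.py | get_sieve_for_test
-- ===== SOURCE A (Python) =====
-- def get_sieve_for_test(max_val):
--     sieve = [False] * max_val
--     for n in range(2, max_val + 2):
--         for i in range(2, max_val):
--             v = n * i - 2
--             if v >= max_val: break
--             sieve[v] = True
--     return sieve
-- ===== SOURCE B (Python) =====
-- def get_sieve_for_test(max_val):
--     # Eratosthenes-style sieve: for each d with d*d < limit, mark every
--     # multiple of d (from d*d up), so sieve[v] = True iff v+2 is composite.
--     limit = max_val + 2
--     sieve = [False] * max_val
--     d = 2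
--     while d * d < limit:
--         for m in range(d * d, limit, d):
--             sieve[m - 2] = True
--         d += 1
--     return sieve
-- ===== Notes on version B (the rewrite author's own statement) =====
-- stated objective: faster
-- what changed: A marks the index of every product of two factors, with the outer factor running over the whole range; B is an Eratosthenes-style sieve that, for each candidate divisor below the square root of the limit, marks its multiples from its square on, so the outer loop is only square-root long and the per-iteration break test disappears.
import Mathlib
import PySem

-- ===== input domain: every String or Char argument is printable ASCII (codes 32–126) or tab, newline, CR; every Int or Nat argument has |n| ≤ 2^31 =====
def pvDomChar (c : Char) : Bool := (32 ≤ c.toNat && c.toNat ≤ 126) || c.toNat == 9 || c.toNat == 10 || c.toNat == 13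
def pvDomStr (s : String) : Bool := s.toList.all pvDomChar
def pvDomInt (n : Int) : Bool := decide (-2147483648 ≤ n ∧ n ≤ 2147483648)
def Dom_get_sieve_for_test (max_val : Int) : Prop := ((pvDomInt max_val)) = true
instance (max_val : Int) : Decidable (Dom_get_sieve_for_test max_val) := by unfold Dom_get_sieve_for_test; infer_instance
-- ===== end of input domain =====

-- B replaces A's trial-multiplication double loop by an Eratosthenes-style sieve
-- (marking the multiples of each d with d*d < limit), a constant-factor speed-up.

-- ===== PORT A =====
-- inner 'for i in range(2, max_val): v = n*i-2; if v >= max_val: break; sieve[v] = True'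
def pvInnerA (max_val n : Int) : List Int → List Bool → List Bool
  | [], sieve => sieve
  | i :: rest, sieve =>
    if n * i - 2 ≥ max_val then sieve
    else pvInnerA max_val n rest (PySem.List.pySetD sieve (n * i - 2) true)

def get_sieve_for_test (max_val : Int) : List Bool :=
  (PySem.List.pyRange 2 (max_val + 2) 1).foldl
    (fun sieve n => pvInnerA max_val n (PySem.List.pyRange 2 max_val 1) sieve)
    (PySem.List.pyRepeat [false] max_val)

-- ===== PORT B =====
-- 'while d * d < limit: for m in range(d*d, limit, d): sieve[m-2] = True; d += 1'
def pvSieveGo (limit : Int) (d : Int) (sieve : List Bool) : List Bool :=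
  if h : d * d < limit then
    pvSieveGo limit (d + 1)
      ((PySem.List.pyRange (d * d) limit d).foldl
        (fun s m => PySem.List.pySetD s (m - 2) true) sieve)
  else sieve
termination_by (limit - d).toNat
decreasing_by
  have hd : d ≤ d * d := by have h2 := Int.le_self_sq d; nlinarith [h2]
  omega

def get_sieve_for_test_alt (max_val : Int) : List Bool :=
  pvSieveGo (max_val + 2) 2 (PySem.List.pyRepeat [false] max_val)

-- ===== PRECONDITION & SPEC =====
def Spec_get_sieve_for_test (max_val : Int) (out : List Bool) : Prop := out = get_sieve_for_test_alt max_val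
instance (max_val : Int) (out : List Bool) : Decidable (Spec_get_sieve_for_test max_val out) := by unfold Spec_get_sieve_for_test; infer_instance

-- ===== CLAIM (what is proved, stated in full; the proofs are below) =====
def Claim_equal_get_sieve_for_test : Prop := ∀ (max_val : Int), Dom_get_sieve_for_test max_val → Spec_get_sieve_for_test max_val (get_sieve_for_test max_val)

-- ===== LEMMAS AND PROOFS =====

-- pyGetD at a nonnegative Int index is List.getD at its toNat
lemma pvGetD_int (xs : List Bool) (j : Int) (hj : 0 ≤ j) :
    PySem.List.pyGetD xs j false = xs.getD j.toNat false := by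
  have h : j = ((j.toNat : Nat) : Int) := by omega
  conv_lhs => rw [h]
  rw [PySem.List.pyGetD_natCast]

-- reading back a single in-range write
lemma pvGetD_setD (s : List Bool) (v j : Int) (hv0 : 0 ≤ v) (hv : v < (s.length : Int))
    (hj : 0 ≤ j) :
    PySem.List.pyGetD (PySem.List.pySetD s v true) j false =
      if j = v then true else PySem.List.pyGetD s j false := by
  rw [PySem.List.pySetD_of_nonneg s true hv0, pvGetD_int _ j hj, pvGetD_int s j hj]
  simp only [List.getD_eq_getElem?_getD, List.getElem?_set]
  split_ifs with h1 h2 h3 h4 <;> simp_all <;> omega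

lemma pvGetD_replicate (n : Nat) (j : Int) (hj : 0 ≤ j) :
    PySem.List.pyGetD (List.replicate n false) j false = false := by
  rw [pvGetD_int _ j hj]
  simp only [List.getD_eq_getElem?_getD, List.getElem?_replicate]
  split <;> rfl

-- ---- B side ----

lemma pvMarkFold_length (l : List Int) (s : List Bool) :
    (l.foldl (fun s m => PySem.List.pySetD s (m - 2) true) s).length = s.length := by
  induction l generalizing s with
  | nil => rfl
  | cons a l ih => simp [List.foldl_cons, ih, PySem.List.length_pySetD]

lemma pvMarkFold_getD (l : List Int) (s : List Bool) (j : Int) (hj : 0 ≤ j)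
    (hl : ∀ m ∈ l, 0 ≤ m - 2 ∧ m - 2 < (s.length : Int)) :
    (PySem.List.pyGetD (l.foldl (fun s m => PySem.List.pySetD s (m - 2) true) s) j false = true
      ↔ PySem.List.pyGetD s j false = true ∨ ∃ m ∈ l, m - 2 = j) := by
  induction l generalizing s with
  | nil => simp
  | cons a l ih =>
    have ha := hl a (by simp)
    have hlen : (PySem.List.pySetD s (a - 2) true).length = s.length :=
      PySem.List.length_pySetD s (a - 2) true
    rw [List.foldl_cons, ih _ (by intro m hm; rw [hlen]; exact hl m (by simp [hm]))]
    rw [pvGetD_setD s (a - 2) j ha.1 ha.2 hj]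
    by_cases h : j = a - 2 <;> simp [h] <;> tauto

lemma pvSieveGo_length (limit : Int) : ∀ d s, (pvSieveGo limit d s).length = s.length := by
  intro d s
  induction hn : (limit - d).toNat using Nat.strong_induction_on generalizing d s with
  | _ n ih =>
    rw [pvSieveGo.eq_def]
    split_ifs with h
    · have hd : d ≤ d * d := by have h2 := Int.le_self_sq d; nlinarith [h2]
      rw [ih (limit - (d + 1)).toNat (by omega) (d + 1) _ rfl, pvMarkFold_length]
    · rfl

lemma pvSieveGo_getD (limit : Int) : ∀ d s j, 2 ≤ d → 0 ≤ j →
    limit ≤ (s.length : Int) + 2 →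
    (PySem.List.pyGetD (pvSieveGo limit d s) j false = true ↔
      PySem.List.pyGetD s j false = true ∨
        ∃ e, d ≤ e ∧ e * e < limit ∧ e * e ≤ j + 2 ∧ j + 2 < limit ∧ e ∣ (j + 2)) := by
  intro d s j hd hj hlim
  induction hn : (limit - d).toNat using Nat.strong_induction_on generalizing d s with
  | _ n ih =>
    rw [pvSieveGo.eq_def]
    split_ifs with h
    · have hdlim : d ≤ d * d := by have h2 := Int.le_self_sq d; nlinarith [h2]
      have hmem : ∀ m ∈ PySem.List.pyRange (d * d) limit d, 0 ≤ m - 2 ∧ m - 2 < (s.length : Int) := by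
        intro m hm
        rw [PySem.List.mem_pyRange_iff_of_pos (by omega)] at hm
        constructor <;> nlinarith [hm.1, hm.2.1]
      have hlen : ((PySem.List.pyRange (d * d) limit d).foldl
          (fun s m => PySem.List.pySetD s (m - 2) true) s).length = s.length :=
        pvMarkFold_length _ _
      rw [ih (limit - (d + 1)).toNat (by omega) (d + 1) _ (by omega) (by rw [hlen]; exact hlim) rfl]
      rw [pvMarkFold_getD _ _ _ hj hmem]
      constructor
      · rintro ((hs | ⟨m, hm, hmj⟩) | ⟨e, he⟩)
        · exact Or.inl hs
        · rw [PySem.List.mem_pyRange_iff_of_pos (by omega)] at hm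
          refine Or.inr ⟨d, le_refl d, ?_, ?_, ?_, ?_⟩ <;>
            [nlinarith [hm.1, hm.2.1]; omega; omega;
             exact (by have hx : d ∣ m - d * d := hm.2.2
                       have hy := dvd_add hx (dvd_mul_right d d)
                       have hz : m - d * d + d * d = j + 2 := by omega
                       rwa [hz] at hy)]
        · exact Or.inr ⟨e, by omega, he.2⟩
      · rintro (hs | ⟨e, hde, helim, hej, hjlim, hdvd⟩)
        · exact Or.inl (Or.inl hs)
        · by_cases hed : e = d
          · subst hed
            refine Or.inl (Or.inr ⟨j + 2, ?_, by omega⟩)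
            rw [PySem.List.mem_pyRange_iff_of_pos (by omega)]
            exact ⟨hej, hjlim, dvd_sub hdvd (dvd_mul_right e e)⟩
          · exact Or.inr ⟨e, by omega, helim, hej, hjlim, hdvd⟩
    · simp only [false_or, iff_self_or]
      rintro ⟨e, hde, helim, _⟩
      exfalso
      have : d * d ≤ e * e := by nlinarith
      omega

-- ---- A side ----

lemma pvInnerA_length (mv n : Int) : ∀ l s, (pvInnerA mv n l s).length = s.length := by
  intro l
  induction l with
  | nil => intro s; rfl
  | cons a l ih =>
    intro s
    rw [pvInnerA]
    split_ifs with h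
    · rfl
    · rw [ih, PySem.List.length_pySetD]

lemma pvInnerA_getD (mv n : Int) (hn : 2 ≤ n) (b : Int) :
    ∀ a s j, 2 ≤ a → 0 ≤ j → mv ≤ (s.length : Int) →
    (PySem.List.pyGetD (pvInnerA mv n (PySem.List.pyRange a b 1) s) j false = true ↔
      PySem.List.pyGetD s j false = true ∨
        ∃ i, a ≤ i ∧ i < b ∧ n * i - 2 = j ∧ n * i - 2 < mv) := by
  intro a s j ha hj hlen
  induction hfuel : (b - a).toNat using Nat.strong_induction_on generalizing a s with
  | _ fuel ih =>
    by_cases hab : b ≤ a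
    · rw [PySem.List.pyRange_one_eq_nil hab]
      simp only [pvInnerA, false_or, iff_self_or]
      rintro ⟨i, h1, h2, _⟩; omega
    · push_neg at hab
      rw [PySem.List.pyRange_one_cons hab, pvInnerA]
      split_ifs with h
      · -- break: n*a-2 ≥ mv, nothing more gets marked
        simp only [false_or, iff_self_or]
        rintro ⟨i, h1, _, _, h4⟩
        have : n * a ≤ n * i := by nlinarith
        omega
      · push_neg at h
        have hv0 : (0:Int) ≤ n * a - 2 := by nlinarith
        have hlen' : (PySem.List.pySetD s (n * a - 2) true).length = s.length :=
          PySem.List.length_pySetD _ _ _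
        rw [ih (b - (a + 1)).toNat (by omega) (a + 1) _ (by omega)
              (by rw [hlen']; exact hlen) rfl]
        rw [pvGetD_setD s (n * a - 2) j hv0 (by omega) hj]
        by_cases hja : j = n * a - 2
        · subst hja
          rw [if_pos rfl]
          constructor
          · intro _
            exact Or.inr ⟨a, le_refl a, hab, rfl, h⟩
          · intro _
            exact Or.inl rfl
        · rw [if_neg hja]
          constructor
          · rintro (hs | ⟨i, h1, h2, h3, h4⟩)
            · exact Or.inl hs
            · exact Or.inr ⟨i, by omega, h2, h3, h4⟩
          · rintro (hs | ⟨i, h1, h2, h3, h4⟩)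
            · exact Or.inl hs
            · have hia : i ≠ a := by rintro rfl; exact hja h3.symm
              exact Or.inr ⟨i, by omega, h2, h3, h4⟩

lemma pvOuterA_length (mv : Int) (l : List Int) (s : List Bool) :
    (l.foldl (fun sieve n => pvInnerA mv n (PySem.List.pyRange 2 mv 1) sieve) s).length
      = s.length := by
  induction l generalizing s with
  | nil => rfl
  | cons a l ih => rw [List.foldl_cons, ih, pvInnerA_length]

lemma pvOuterA_getD (mv : Int) (b : Int) :
    ∀ c s j, 2 ≤ c → 0 ≤ j → mv ≤ (s.length : Int) →
    (PySem.List.pyGetD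
        ((PySem.List.pyRange c b 1).foldl
          (fun sieve n => pvInnerA mv n (PySem.List.pyRange 2 mv 1) sieve) s) j false = true ↔
      PySem.List.pyGetD s j false = true ∨
        ∃ n i, c ≤ n ∧ n < b ∧ 2 ≤ i ∧ i < mv ∧ n * i - 2 = j ∧ n * i - 2 < mv) := by
  intro c s j hc hj hlen
  induction hfuel : (b - c).toNat using Nat.strong_induction_on generalizing c s with
  | _ fuel ih =>
    by_cases hcb : b ≤ c
    · rw [PySem.List.pyRange_one_eq_nil hcb]
      simp only [List.foldl_nil, false_or, iff_self_or]
      rintro ⟨n, i, h1, h2, _⟩; omega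
    · push_neg at hcb
      rw [PySem.List.pyRange_one_cons hcb, List.foldl_cons]
      have hlen' : (pvInnerA mv c (PySem.List.pyRange 2 mv 1) s).length = s.length :=
        pvInnerA_length _ _ _ _
      rw [ih (b - (c + 1)).toNat (by omega) (c + 1) _ (by omega)
            (by rw [hlen']; exact hlen) rfl]
      rw [pvInnerA_getD mv c hc mv 2 s j (le_refl 2) hj hlen]
      constructor
      · rintro ((hs | ⟨i, h1, h2, h3, h4⟩) | ⟨n, i, h1, h2, h3, h4, h5, h6⟩)
        · exact Or.inl hs
        · exact Or.inr ⟨c, i, le_refl c, hcb, h1, h2, h3, h4⟩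
        · exact Or.inr ⟨n, i, by omega, h2, h3, h4, h5, h6⟩
      · rintro (hs | ⟨n, i, h1, h2, h3, h4, h5, h6⟩)
        · exact Or.inl (Or.inl hs)
        · by_cases hnc : n = c
          · subst hnc; exact Or.inl (Or.inr ⟨i, h3, h4, h5, h6⟩)
          · exact Or.inr ⟨n, i, by omega, h2, h3, h4, h5, h6⟩

-- ---- the arithmetic bridge: a pair of factors ≥ 2 vs a divisor d with d*d ≤ m ----

lemma pvBridge (mv j : Int) (hj : 0 ≤ j) (hjmv : j < mv) :
    ((∃ n i, 2 ≤ n ∧ n < mv + 2 ∧ 2 ≤ i ∧ i < mv ∧ n * i - 2 = j ∧ n * i - 2 < mv) ↔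
      (∃ e, 2 ≤ e ∧ e * e < mv + 2 ∧ e * e ≤ j + 2 ∧ j + 2 < mv + 2 ∧ e ∣ (j + 2))) := by
  constructor
  · rintro ⟨n, i, hn, _, hi, _, hni, hlt⟩
    rcases le_total n i with hc | hc
    · exact ⟨n, hn, by nlinarith, by nlinarith, by omega, ⟨i, by omega⟩⟩
    · exact ⟨i, hi, by nlinarith, by nlinarith, by omega, ⟨n, by rw [mul_comm]; omega⟩⟩
  · rintro ⟨e, he, helim, hej, hjlim, ⟨i, hi⟩⟩
    have hie : e ≤ i := by nlinarith
    have himv : i < mv := by nlinarith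
    exact ⟨e, i, he, by omega, by omega, himv, by omega, by omega⟩

-- ---- assembling both sides elementwise ----

lemma pvA_getD (mv j : Int) (hj : 0 ≤ j) (hjmv : j < mv) :
    (PySem.List.pyGetD (get_sieve_for_test mv) j false = true ↔
      ∃ e, 2 ≤ e ∧ e * e < mv + 2 ∧ e * e ≤ j + 2 ∧ j + 2 < mv + 2 ∧ e ∣ (j + 2)) := by
  unfold get_sieve_for_test
  rw [PySem.List.pyRepeat_singleton]
  rw [pvOuterA_getD mv (mv + 2) 2 _ j (le_refl 2) hj (by simp)]
  rw [pvGetD_replicate _ j hj]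
  simp only [Bool.false_eq_true, false_or]
  rw [pvBridge mv j hj hjmv]

lemma pvB_getD (mv j : Int) (hj : 0 ≤ j) :
    (PySem.List.pyGetD (get_sieve_for_test_alt mv) j false = true ↔
      ∃ e, 2 ≤ e ∧ e * e < mv + 2 ∧ e * e ≤ j + 2 ∧ j + 2 < mv + 2 ∧ e ∣ (j + 2)) := by
  unfold get_sieve_for_test_alt
  rw [PySem.List.pyRepeat_singleton]
  rw [pvSieveGo_getD (mv + 2) 2 _ j (le_refl 2) hj (by simp)]
  rw [pvGetD_replicate _ j hj]
  simp only [Bool.false_eq_true, false_or]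

lemma pvA_length (mv : Int) : (get_sieve_for_test mv).length = mv.toNat := by
  unfold get_sieve_for_test
  rw [PySem.List.pyRepeat_singleton, pvOuterA_length, List.length_replicate]

lemma pvB_length (mv : Int) : (get_sieve_for_test_alt mv).length = mv.toNat := by
  unfold get_sieve_for_test_alt
  rw [PySem.List.pyRepeat_singleton, pvSieveGo_length, List.length_replicate]

-- ===== VERDICT (by name: the statement is the Claim_ definition above) =====
theorem get_sieve_for_test_spec : Claim_equal_get_sieve_for_test := by
  intro mv _
  unfold Spec_get_sieve_for_test
  apply List.ext_getElem (by rw [pvA_length, pvB_length])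
  intro k hk1 hk2
  have hkmv : (k : Int) < mv := by
    have := pvA_length mv; omega
  have hA : PySem.List.pyGetD (get_sieve_for_test mv) (k : Int) false
      = (get_sieve_for_test mv)[k] := by
    rw [PySem.List.pyGetD_eq_getElem _ _ (by omega) (by exact_mod_cast hk1)]
    simp
  have hB : PySem.List.pyGetD (get_sieve_for_test_alt mv) (k : Int) false
      = (get_sieve_for_test_alt mv)[k] := by
    rw [PySem.List.pyGetD_eq_getElem _ _ (by omega) (by exact_mod_cast hk2)]
    simp
  rw [Bool.eq_iff_iff, ← hA, ← hB]
  rw [pvA_getD mv k (by omega) hkmv, pvB_getD mv k (by omega)]
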